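-- pv_equiv track=rewrite | github.com/Jeong-jin-Han/CS454_Project | benchmark/arbitrary6.py | f
-- ===== SOURCE A (Python) =====
-- def f(n: int, k: int) -> int:
--     total = 0
--     x = n
--
--     while x > 0:
--         total += (x // k)
--         if x == k:
--             total += 5
--         x -= 1
--
--     if total < 3:
--         return total * 2
--     else:
--         return total - 3
-- ===== SOURCE B (Python) =====
-- def f(n: int, k: int) -> int:
--     # Closed-form: sum_{x=1..n} x//k in O(1) via divmod, +5 bonus iff 1 <= k <= n.
--     if n <= 0:
--         total = 0
--     elif k > 0:
--         q, r = divmod(n, k)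
--         total = k * q * (q - 1) // 2 + q * (r + 1)
--         if k <= n:
--             total += 5
--     else:
--         m = -k
--         q, r = divmod(n - 1, m)
--         total = -(n + m * q * (q - 1) // 2 + q * (r + 1))
--     return total * 2 if total < 3 else total - 3
-- ===== Notes on version B (the rewrite author's own statement) =====
-- stated objective: faster
-- what changed: A's O(n) while loop summing x//k for x = n..1 (plus 5 when x hits k) is replaced by an O(1) closed form: one divmod gives sum_{x=1..n} x//k as k*q*(q-1)//2 + q*(r+1) (negative k via the mirrored decomposition of n-1 by -k), with the bonus 5 added exactly when 1 <= k <= n.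
import Mathlib
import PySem

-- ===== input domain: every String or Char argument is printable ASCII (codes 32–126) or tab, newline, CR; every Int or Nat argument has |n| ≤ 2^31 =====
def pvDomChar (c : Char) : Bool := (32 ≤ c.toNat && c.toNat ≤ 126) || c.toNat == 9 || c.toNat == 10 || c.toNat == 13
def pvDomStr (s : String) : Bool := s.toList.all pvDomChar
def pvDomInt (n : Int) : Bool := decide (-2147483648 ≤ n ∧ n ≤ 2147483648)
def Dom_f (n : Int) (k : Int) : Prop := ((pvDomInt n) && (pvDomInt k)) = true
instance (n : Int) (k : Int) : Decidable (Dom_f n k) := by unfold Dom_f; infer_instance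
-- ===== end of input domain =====

-- B replaces A's O(n) loop summing x//k for x = n..1 by an O(1) closed form from divmod, adding the bonus 5 iff 1 ≤ k ≤ n.

-- ===== PORT A =====
-- the while loop of A: x counts down, total accumulates x//k (+5 when x == k)
def fLoopA (k : Int) (x : Int) (total : Int) : Int :=
  if h : x > 0 then
    let t1 := total + PySem.Int.floordiv x k
    let t2 := if x = k then t1 + 5 else t1
    fLoopA k (x - 1) t2
  else total
termination_by x.toNat
decreasing_by omega

def f (n : Int) (k : Int) : Int :=
  let total := fLoopA k n 0
  if total < 3 then total * 2 else total - 3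

-- ===== PORT B =====
-- closed-form total: Σ_{x=1..n} x//k (+ bonus), via divmod as in Source B
def totalB (n : Int) (k : Int) : Int :=
  if n ≤ 0 then 0
  else if 0 < k then
    let q := PySem.Int.floordiv n k
    let r := PySem.Int.mod n k
    PySem.Int.floordiv (k * q * (q - 1)) 2 + q * (r + 1) + (if k ≤ n then 5 else 0)
  else
    let m := -k
    let q := PySem.Int.floordiv (n - 1) m
    let r := PySem.Int.mod (n - 1) m;
    -(n + PySem.Int.floordiv (m * q * (q - 1)) 2 + q * (r + 1))

def f_alt (n : Int) (k : Int) : Int :=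
  let total := totalB n k
  if total < 3 then total * 2 else total - 3

-- ===== PRECONDITION & SPEC =====
-- A raises ZeroDivisionError iff k = 0 and the loop runs (n > 0); exactly those inputs are excluded.
def Pre_f (n : Int) (k : Int) : Prop := k ≠ 0 ∨ n ≤ 0
instance (n : Int) (k : Int) : Decidable (Pre_f n k) := by unfold Pre_f; infer_instance
def pvWitness_f : Int × Int := (10, 3)

def Spec_f (n : Int) (k : Int) (out : Int) : Prop := out = f_alt n k
instance (n : Int) (k : Int) (out : Int) : Decidable (Spec_f n k out) := by unfold Spec_f; infer_instance

-- ===== CLAIM (what is proved, stated in full; the proofs are below) =====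
def Claim_equal_f : Prop := ∀ (n : Int) (k : Int), Dom_f n k → Pre_f n k → Spec_f n k (f n k)

-- ===== LEMMAS AND PROOFS =====

-- x // 2 when x is visibly even
lemma fd_half (x u : Int) (h : x = 2 * u) : PySem.Int.floordiv x 2 = u := by
  rw [PySem.Int.floordiv_eq_iff_of_pos (by norm_num)]
  omega

-- uniqueness of Python divmod, positive divisor
lemma fd_eq_of_pos (a k q r : Int) (hk : 0 < k) (h : a = q * k + r) (h0 : 0 ≤ r) (h1 : r < k) :
    PySem.Int.floordiv a k = q ∧ PySem.Int.mod a k = r := by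
  have hq : PySem.Int.floordiv a k = q := by
    rw [PySem.Int.floordiv_eq_iff_of_pos hk]
    have e : (q + 1) * k = q * k + k := by ring
    constructor <;> linarith
  refine ⟨hq, ?_⟩
  have h2 := PySem.Int.floordiv_mul_add_mod a k
  rw [hq] at h2; linarith

-- uniqueness of Python divmod, negative divisor (remainder in (k, 0])
lemma fd_eq_of_neg (a k q r : Int) (hk : k < 0) (h : a = q * k + r) (h1 : k < r) (h2 : r ≤ 0) :
    PySem.Int.floordiv a k = q ∧ PySem.Int.mod a k = r := by
  have h3 := PySem.Int.floordiv_mul_add_mod a k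
  have h4 := PySem.Int.mod_neg_bounds (a := a) hk
  set q0 := PySem.Int.floordiv a k with hq0
  set r0 := PySem.Int.mod a k with hr0
  have hq : q0 = q := by
    by_contra hne
    rcases lt_or_gt_of_ne hne with hlt | hgt
    · have : (q - q0) * k ≤ 1 * k :=
        mul_le_mul_of_nonpos_right (by omega) (le_of_lt hk)
      nlinarith
    · have : (q0 - q) * k ≤ 1 * k :=
        mul_le_mul_of_nonpos_right (by omega) (le_of_lt hk)
      nlinarith
  refine ⟨hq, ?_⟩
  rw [hq] at h3; linarith

-- the triangular part: m*q*(q-1)//2 steps down by m*(q-1)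
lemma Tdiff (m q : Int) :
    PySem.Int.floordiv (m * q * (q - 1)) 2
      = PySem.Int.floordiv (m * (q - 1) * (q - 1 - 1)) 2 + m * (q - 1) := by
  obtain ⟨t, ht⟩ := Int.even_mul_succ_self (q - 1)
  obtain ⟨s, hs⟩ := Int.even_mul_succ_self (q - 2)
  have ht' : m * q * (q - 1) = 2 * (m * t) := by linear_combination m * ht
  have hs' : m * (q - 1) * (q - 1 - 1) = 2 * (m * s) := by linear_combination m * hs
  rw [fd_half _ _ ht', fd_half _ _ hs']
  have h2 : 2 * (m * t) - 2 * (m * s) = 2 * (m * (q - 1)) := by linear_combination hs' - ht'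
  linarith

-- accumulator shift for A's loop
lemma fLoopA_shift (k : Int) : ∀ (j : Nat) (x : Int), x.toNat = j → ∀ (t : Int),
    fLoopA k x t = t + fLoopA k x 0 := by
  intro j
  induction j with
  | zero =>
    intro x hx t
    have h : ¬ x > 0 := by omega
    conv_lhs => rw [fLoopA.eq_def]
    conv_rhs => rw [fLoopA.eq_def]
    rw [dif_neg h, dif_neg h]
    ring
  | succ j ih =>
    intro x hx t
    have hx1 : x > 0 := by omega
    conv_lhs => rw [fLoopA.eq_def]
    conv_rhs => rw [fLoopA.eq_def]
    rw [dif_pos hx1, dif_pos hx1]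
    dsimp only
    have hxt : (x - 1).toNat = j := by omega
    by_cases hxk : x = k
    · rw [if_pos hxk, if_pos hxk,
          ih (x - 1) hxt (t + PySem.Int.floordiv x k + 5),
          ih (x - 1) hxt (0 + PySem.Int.floordiv x k + 5)]
      ring
    · rw [if_neg hxk, if_neg hxk,
          ih (x - 1) hxt (t + PySem.Int.floordiv x k),
          ih (x - 1) hxt (0 + PySem.Int.floordiv x k)]
      ring

-- one unrolling of A's loop, accumulator zero
lemma step_A (k x : Int) (hx : 0 < x) :
    fLoopA k x 0 = fLoopA k (x - 1) 0 + PySem.Int.floordiv x k + (if x = k then 5 else 0) := by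
  conv_lhs => rw [fLoopA.eq_def]
  rw [dif_pos hx]
  dsimp only
  rw [fLoopA_shift k (x - 1).toNat (x - 1) rfl]
  split_ifs <;> ring

-- closed form of totalB's positive branch, valid for all n ≥ 0 (also n = 0)
def Bpos (n k : Int) : Int :=
  PySem.Int.floordiv (k * PySem.Int.floordiv n k * (PySem.Int.floordiv n k - 1)) 2
    + PySem.Int.floordiv n k * (PySem.Int.mod n k + 1)
    + (if k ≤ n then 5 else 0)

-- closed form of totalB's negative branch, valid for all n ≥ 0 (also n = 0)
def Bneg (n k : Int) : Int :=
  -(n + PySem.Int.floordiv ((-k) * PySem.Int.floordiv (n - 1) (-k) * (PySem.Int.floordiv (n - 1) (-k) - 1)) 2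
      + PySem.Int.floordiv (n - 1) (-k) * (PySem.Int.mod (n - 1) (-k) + 1))

lemma totalB_pos_eq (n k : Int) (hk : 0 < k) (hn : 0 ≤ n) : totalB n k = Bpos n k := by
  by_cases hn0 : n ≤ 0
  · have hn' : n = 0 := le_antisymm hn0 hn
    subst hn'
    obtain ⟨e1, e2⟩ := fd_eq_of_pos 0 k 0 0 hk (by ring) le_rfl hk
    unfold totalB Bpos
    rw [if_pos le_rfl, e1, e2, if_neg (by omega : ¬ k ≤ (0 : Int)),
        fd_half (k * 0 * (0 - 1)) 0 (by ring)]
    ring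
  · unfold totalB Bpos
    rw [if_neg hn0, if_pos hk]

lemma totalB_neg_eq (n k : Int) (hk : k < 0) (hn : 0 ≤ n) : totalB n k = Bneg n k := by
  by_cases hn0 : n ≤ 0
  · have hn' : n = 0 := le_antisymm hn0 hn
    subst hn'
    obtain ⟨e1, e2⟩ := fd_eq_of_pos (0 - 1) (-k) (-1) (-k - 1) (by omega) (by ring) (by omega) (by omega)
    unfold totalB Bneg
    rw [if_pos le_rfl, e1, e2, fd_half ((-k) * (-1) * (-1 - 1)) (-k) (by ring)]
    ring
  · unfold totalB Bneg
    rw [if_neg hn0, if_neg (by omega : ¬ 0 < k)]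

-- the closed form satisfies the loop's recurrence
lemma totalB_rec (k : Int) (hk : k ≠ 0) (x : Int) (hx : 0 < x) :
    totalB x k = totalB (x - 1) k + PySem.Int.floordiv x k + (if x = k then 5 else 0) := by
  rcases lt_or_gt_of_ne hk with hkneg | hkpos
  · -- k < 0
    rw [totalB_neg_eq x k hkneg (by omega), totalB_neg_eq (x - 1) k hkneg (by omega),
        if_neg (by omega : ¬ x = k)]
    unfold Bneg
    have h := PySem.Int.floordiv_mul_add_mod (x - 1) (-k)
    have hr0 : 0 ≤ PySem.Int.mod (x - 1) (-k) := PySem.Int.mod_nonneg (a := x - 1) (by omega)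
    have hrm : PySem.Int.mod (x - 1) (-k) < -k := PySem.Int.mod_lt (a := x - 1) (by omega)
    by_cases hx1 : x = 1
    · subst hx1
      obtain ⟨e1, e2⟩ := fd_eq_of_pos (1 - 1) (-k) 0 0 (by omega) (by ring) le_rfl (by omega)
      obtain ⟨e3, e4⟩ := fd_eq_of_pos (1 - 1 - 1) (-k) (-1) (-k - 1) (by omega) (by ring) (by omega) (by omega)
      obtain ⟨e5, _⟩ := fd_eq_of_neg 1 k (-1) (1 + k) hkneg (by ring) (by omega) (by omega)
      rw [e1, e2, e3, e4, e5,
          fd_half ((-k) * 0 * (0 - 1)) 0 (by ring),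
          fd_half ((-k) * (-1) * (-1 - 1)) (-k) (by ring)]
      ring
    · have hx2 : 2 ≤ x := by omega
      by_cases hr1 : PySem.Int.mod (x - 1) (-k) = 0
      · -- divisor boundary inside the negative branch
        have hq1 : 1 ≤ PySem.Int.floordiv (x - 1) (-k) := by
          by_contra hq
          have e0 : (0 : Int) * (-k) = 0 := by ring
          have h2 : PySem.Int.floordiv (x - 1) (-k) * (-k) ≤ 0 * (-k) :=
            mul_le_mul_of_nonneg_right (by omega) (by omega)
          linarith [h, h2, e0]
        obtain ⟨e1, e2⟩ := fd_eq_of_pos (x - 1 - 1) (-k) (PySem.Int.floordiv (x - 1) (-k) - 1) (-k - 1) (by omega)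
          (by have e : (PySem.Int.floordiv (x - 1) (-k) - 1) * (-k)
                  = PySem.Int.floordiv (x - 1) (-k) * (-k) + k := by ring
              linarith [h, e]) (by omega) (by omega)
        obtain ⟨e5, _⟩ := fd_eq_of_neg x k (-(1 + PySem.Int.floordiv (x - 1) (-k))) (1 + k) hkneg
          (by have e : (-(1 + PySem.Int.floordiv (x - 1) (-k))) * k
                  = -k + PySem.Int.floordiv (x - 1) (-k) * (-k) := by ring
              linarith [h, e]) (by omega) (by omega)
        rw [e1, e2, e5, Tdiff (-k) (PySem.Int.floordiv (x - 1) (-k)), hr1]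
        ring
      · obtain ⟨e1, e2⟩ := fd_eq_of_pos (x - 1 - 1) (-k) (PySem.Int.floordiv (x - 1) (-k))
          (PySem.Int.mod (x - 1) (-k) - 1) (by omega) (by linarith [h]) (by omega) (by omega)
        obtain ⟨e5, _⟩ := fd_eq_of_neg x k (-(1 + PySem.Int.floordiv (x - 1) (-k)))
          (PySem.Int.mod (x - 1) (-k) + 1 + k) hkneg
          (by have e : (-(1 + PySem.Int.floordiv (x - 1) (-k))) * k
                  = -k + PySem.Int.floordiv (x - 1) (-k) * (-k) := by ring
              linarith [h, e]) (by omega) (by omega)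
        rw [e1, e2, e5]
        ring
  · -- 0 < k
    rw [totalB_pos_eq x k hkpos (by omega), totalB_pos_eq (x - 1) k hkpos (by omega)]
    unfold Bpos
    have h := PySem.Int.floordiv_mul_add_mod x k
    have hr0 : 0 ≤ PySem.Int.mod x k := PySem.Int.mod_nonneg (a := x) hkpos
    have hrk : PySem.Int.mod x k < k := PySem.Int.mod_lt (a := x) hkpos
    by_cases hr1 : PySem.Int.mod x k = 0
    · have hq1 : 1 ≤ PySem.Int.floordiv x k := by
        by_contra hq
        have e0 : (0 : Int) * k = 0 := by ring
        have h2 : PySem.Int.floordiv x k * k ≤ 0 * k :=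
          mul_le_mul_of_nonneg_right (by omega) (le_of_lt hkpos)
        linarith [h, h2, e0]
      obtain ⟨e1, e2⟩ := fd_eq_of_pos (x - 1) k (PySem.Int.floordiv x k - 1) (k - 1) hkpos
        (by have e : (PySem.Int.floordiv x k - 1) * k = PySem.Int.floordiv x k * k - k := by ring
            linarith [h, e]) (by omega) (by omega)
      rw [e1, e2, Tdiff k (PySem.Int.floordiv x k), hr1]
      by_cases hq2 : PySem.Int.floordiv x k = 1
      · have h1 := h
        rw [hq2, hr1] at h1
        have hxk : x = k := by linarith [h1]
        rw [hq2, if_pos (by omega : k ≤ x), if_neg (by omega : ¬ k ≤ x - 1),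
            if_pos (by omega : x = k)]
        ring
      · have hxk : x ≠ k := by
          intro he
          have h3 : (PySem.Int.floordiv x k - 1) * k = 0 := by
            have e : (PySem.Int.floordiv x k - 1) * k = PySem.Int.floordiv x k * k - k := by ring
            linarith [h, e]
          rcases mul_eq_zero.mp h3 with h4 | h4
          · omega
          · omega
        have hklex : k ≤ x - 1 := by
          have h5 : 2 * k ≤ PySem.Int.floordiv x k * k :=
            mul_le_mul_of_nonneg_right (by omega) (le_of_lt hkpos)
          linarith [h, h5]
        rw [if_pos (by omega : k ≤ x), if_pos hklex, if_neg hxk]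
        ring
    · obtain ⟨e1, e2⟩ := fd_eq_of_pos (x - 1) k (PySem.Int.floordiv x k)
        (PySem.Int.mod x k - 1) hkpos (by linarith [h]) (by omega) (by omega)
      have hxk : x ≠ k := by
        intro he
        obtain ⟨_, e4⟩ := fd_eq_of_pos k k 1 0 hkpos (by ring) le_rfl hkpos
        apply hr1
        rw [he, e4]
      rw [e1, e2,
          show (if k ≤ x - 1 then (5 : Int) else 0) = (if k ≤ x then (5 : Int) else 0) from by
            split_ifs <;> omega,
          if_neg hxk]
      ring

-- the loop equals the closed form
lemma loop_eq (k : Int) (hk : k ≠ 0) : ∀ (j : Nat) (x : Int), x.toNat = j →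
    fLoopA k x 0 = totalB x k := by
  intro j
  induction j with
  | zero =>
    intro x hx
    rw [fLoopA.eq_def, dif_neg (by omega : ¬ x > 0), totalB, if_pos (by omega : x ≤ 0)]
  | succ j ih =>
    intro x hx
    have hx1 : 0 < x := by omega
    rw [step_A k x hx1, ih (x - 1) (by omega), totalB_rec k hk x hx1]

-- ===== VERDICT (by name: the statement is the Claim_ definition above) =====
theorem f_spec : Claim_equal_f := by
  intro n k _ hpre
  unfold Spec_f f f_alt
  by_cases hn : n ≤ 0
  · rw [show fLoopA k n 0 = 0 from by rw [fLoopA.eq_def, dif_neg (by omega : ¬ n > 0)],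
        show totalB n k = 0 from by rw [totalB, if_pos hn]]
  · have hk : k ≠ 0 := hpre.resolve_right hn
    rw [loop_eq k hk n.toNat n rfl]
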